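-- pv_equiv track=rewrite | github.com/aybekko97/good_repository | thesun/ML/Controller/StringController.py | before
-- ===== SOURCE A (Python) =====
-- def before(given_str, to_find):
--     result = ""
--     for i in range(0, len(given_str)):
--         found = True
--         for j in range(0, len(to_find)):
--             if i + j >= len(given_str):
--                 found = False
--                 break
--             if given_str[i + j] != to_find[j]:
--                 found = False
--                 break
--         if not found:
--             result += given_str[i]
--         else:
--             break
--     return result
-- ===== SOURCE B (Python) =====
-- def before(given_str, to_find):
--     idx = given_str.find(to_find)
--     return given_str if idx < 0 else given_str[:idx]
-- ===== Notes on version B (the rewrite author's own statement) =====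
-- stated objective: idiomatic
-- what changed: Replaces the hand-written quadratic scan with nested character loops by a single str.find call followed by one slice (whole string when absent).
import Mathlib
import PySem

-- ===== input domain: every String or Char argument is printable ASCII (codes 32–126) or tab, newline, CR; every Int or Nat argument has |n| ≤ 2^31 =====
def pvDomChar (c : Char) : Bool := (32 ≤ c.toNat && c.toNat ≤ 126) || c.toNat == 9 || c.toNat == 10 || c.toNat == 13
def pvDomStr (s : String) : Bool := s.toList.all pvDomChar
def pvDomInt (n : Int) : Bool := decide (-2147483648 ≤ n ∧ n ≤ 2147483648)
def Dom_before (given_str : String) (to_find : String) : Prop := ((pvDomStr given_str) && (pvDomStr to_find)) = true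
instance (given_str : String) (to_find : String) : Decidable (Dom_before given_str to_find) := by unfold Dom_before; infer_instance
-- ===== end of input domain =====

-- B replaces A's hand-written nested-loop scan by a single find call plus one slice (idiomatic).


-- ===== PORT A =====
-- inner 'for j in range(0, len(to_find))' loop with its two breaks; returns the final 'found'
def beforeInner (s t : List Char) (i : Nat) (j : Nat) : Bool :=
  if _h : j < t.length then
    if s.length ≤ i + j then false
    else if s.getD (i + j) ' ' ≠ t.getD j ' ' then false
    else beforeInner s t i (j + 1)
  else true
termination_by t.length - j

-- outer 'for i in range(0, len(given_str))' loop accumulating 'result', break when found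
def beforeLoop (s t : List Char) (i : Nat) (acc : List Char) : List Char :=
  if _h : i < s.length then
    if beforeInner s t i 0 then acc
    else beforeLoop s t (i + 1) (acc ++ [s.getD i ' '])
  else acc
termination_by s.length - i

def before (given_str : String) (to_find : String) : String :=
  String.ofList (beforeLoop given_str.toList to_find.toList 0 [])

-- ===== PORT B =====
def before_alt (given_str : String) (to_find : String) : String :=
  let idx := PySem.Str.find given_str to_find
  if idx < 0 then given_str else PySem.Str.slice given_str none (some idx)

-- ===== PRECONDITION & SPEC =====
def Spec_before (given_str : String) (to_find : String) (out : String) : Prop := out = before_alt given_str to_find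
instance (given_str : String) (to_find : String) (out : String) : Decidable (Spec_before given_str to_find out) := by unfold Spec_before; infer_instance

-- ===== CLAIM (what is proved, stated in full; the proofs are below) =====
def Claim_equal_before : Prop := ∀ (given_str : String) (to_find : String), Dom_before given_str to_find → Spec_before given_str to_find (before given_str to_find)

-- ===== LEMMAS AND PROOFS =====

-- A's inner loop decides "to_find is a prefix of given_str[i:]" (shifted by j)
theorem beforeInner_iff (s t : List Char) (i : Nat) :
    ∀ j, beforeInner s t i j = true ↔ t.drop j <+: s.drop (i + j) := by
  intro j
  induction hm : t.length - j using Nat.strong_induction_on generalizing j with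
  | _ m ih =>
    rw [beforeInner]
    by_cases hj : j < t.length
    · simp only [hj, dif_pos]
      have ht : t.drop j = t[j] :: t.drop (j + 1) := List.drop_eq_getElem_cons hj
      by_cases hs : s.length ≤ i + j
      · have hnil : s.drop (i + j) = [] := List.drop_eq_nil_of_le hs
        rw [if_pos hs, hnil, ht]
        simp [hj]
      · rw [Nat.not_le] at hs
        have hsd : s.drop (i + j) = s[i + j]'hs :: s.drop (i + j + 1) :=
          List.drop_eq_getElem_cons hs
        have hg : s.getD (i + j) ' ' = s[i + j]'hs := List.getD_eq_getElem s ' ' hs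
        have hgt : t.getD j ' ' = t[j]'hj := List.getD_eq_getElem t ' ' hj
        by_cases hc : s[i + j]'hs = t[j]'hj
        · have hrec := ih (t.length - (j + 1)) (by omega) (j + 1) rfl
          simp only [Nat.not_le.mpr hs, if_false, hg, hgt, hc, ne_eq, not_true_eq_false,
            if_false]
          rw [hrec, ht, hsd, hc]
          constructor
          · intro h; exact (List.cons_prefix_cons).mpr ⟨rfl, by simpa [Nat.add_assoc] using h⟩
          · intro h; have := (List.cons_prefix_cons).mp h; simpa [Nat.add_assoc] using this.2
        · simp only [Nat.not_le.mpr hs, if_false, hg, hgt, ne_eq, hc, not_false_eq_true,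
            if_true]
          rw [ht, hsd]
          constructor
          · intro h; exact absurd h (by simp)
          · intro h; exact absurd ((List.cons_prefix_cons).mp h).1 (fun e => hc e.symm)
    · simp only [hj, dif_neg, not_false_eq_true]
      have : t.drop j = [] := List.drop_eq_nil_of_le (by omega)
      simp [this]

-- A's outer loop copies characters up to the first index k where the pattern matches
theorem beforeLoop_eq (s t : List Char) (k : Nat) (hk : k ≤ s.length)
    (hb : ∀ j, j < k → ¬ t <+: s.drop j)
    (hat : k = s.length ∨ t <+: s.drop k) :
    ∀ i acc, i ≤ k → beforeLoop s t i acc = acc ++ (s.drop i).take (k - i) := by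
  intro i
  induction hm : k - i using Nat.strong_induction_on generalizing i with
  | _ m ih =>
    intro acc hik
    subst hm
    rw [beforeLoop]
    by_cases hi : i < s.length
    · simp only [hi, dif_pos]
      have hinner := beforeInner_iff s t i 0
      by_cases hf : beforeInner s t i 0 = true
      · have hik2 : i = k := by
          by_contra hne
          exact hb i (by omega) (by simpa using hinner.mp hf)
        subst hik2
        simp [hf]
      · have hnpre : ¬ t <+: s.drop i := by
          intro h; exact hf (hinner.mpr (by simpa using h))
        have hik' : i < k := by
          rcases Nat.lt_or_ge i k with h | h
          · exact h
          · have : i = k := by omega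
            subst this
            rcases hat with h' | h'
            · omega
            · exact absurd h' hnpre
        rw [if_neg hf]
        have hrec := ih (k - (i + 1)) (by omega) (i + 1) rfl (acc ++ [s.getD i ' ']) (by omega)
        rw [hrec]
        have hsd : s.drop i = s[i]'hi :: s.drop (i + 1) := List.drop_eq_getElem_cons hi
        have hg : s.getD i ' ' = s[i]'hi := List.getD_eq_getElem s ' ' hi
        have hki : k - i = (k - (i + 1)) + 1 := by omega
        rw [hg, hsd, hki, List.take_succ_cons, List.append_assoc]
        rfl
    · have hik2 : i = k := by omega
      subst hik2
      have hd : s.drop i = [] := List.drop_eq_nil_of_le (by omega)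
      simp [hi, hd]

theorem before_eq_alt (g t : String) : before g t = before_alt g t := by
  unfold before before_alt
  have hfind : PySem.Str.find g t = PySem.Chars.find g.toList t.toList := PySem.Str.find_eq g t
  by_cases hneg : PySem.Chars.find g.toList t.toList < 0
  · -- no occurrence: A copies the whole string, B returns it unchanged
    have hne : PySem.Chars.find g.toList t.toList = -1 := by
      have := PySem.Chars.neg_one_le_find g.toList t.toList
      omega
    have hninf : ¬ t.toList <:+: g.toList := (PySem.Chars.find_eq_neg_one_iff _ _).mp hne
    have hnone : ∀ j, ¬ t.toList <+: g.toList.drop j := by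
      intro j hj
      have hIn : PySem.Chars.isIn t.toList g.toList = true :=
        (PySem.Chars.exists_prefix_drop_iff_isIn _ _).mp ⟨j, hj⟩
      exact hninf ((PySem.Chars.isIn_iff_infix _ _).mp hIn)
    have hloop := beforeLoop_eq g.toList t.toList g.toList.length le_rfl
      (fun j _ => hnone j) (Or.inl rfl) 0 [] (Nat.zero_le _)
    have h1 : beforeLoop g.toList t.toList 0 [] = g.toList := by
      rw [hloop]; simp
    rw [h1]
    simp [hneg]
  · -- first occurrence at (find).toNat: A copies exactly that prefix, B slices there
    rw [Int.not_lt] at hneg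
    have hspec := PySem.Chars.find_spec (s := g.toList) (sub := t.toList) hneg
    have hle : (PySem.Chars.find g.toList t.toList).toNat ≤ g.toList.length := by
      have := PySem.Chars.find_le_length g.toList t.toList
      omega
    have hloop := beforeLoop_eq g.toList t.toList (PySem.Chars.find g.toList t.toList).toNat hle
      (fun j hj => hspec.2 j hj) (Or.inr hspec.1) 0 [] (Nat.zero_le _)
    have h1 : beforeLoop g.toList t.toList 0 [] =
        g.toList.take (PySem.Chars.find g.toList t.toList).toNat := by
      rw [hloop]; simp
    have hslice : PySem.Chars.slice g.toList none (some (PySem.Chars.find g.toList t.toList)) =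
        g.toList.take (PySem.Chars.find g.toList t.toList).toNat := by
      have := PySem.List.slice_to (xs := g.toList) (b := PySem.Chars.find g.toList t.toList) hneg
      simpa [PySem.Chars.slice_eq_listSlice] using this
    rw [h1]
    simp only [hfind, Int.not_lt.mpr hneg, if_false]
    apply String.toList_inj.mp
    rw [PySem.Str.toList_slice, hslice]
    simp

-- ===== VERDICT (by name: the statement is the Claim_ definition above) =====
theorem before_spec : Claim_equal_before := by
  intro g t _
  unfold Spec_before
  exact before_eq_alt g t
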